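-- pv_equiv track=rewrite | github.com/CamillaLisboa/Arquivos-Python | Hackathon/Gabarito/1248 - Problema H (Plano de Dieta).py | verificar_dieta
-- ===== SOURCE A (Python) =====
-- def verificar_dieta(dieta, cafe_manha, almoco):
--     consumido = cafe_manha + almoco
--     dieta_set = set(dieta)
--     consumido_set = set(consumido)
--     if not consumido_set.issubset(dieta_set):
--         return "CHEATER"
--     for alimento in consumido:
--         if consumido.count(alimento) > dieta.count(alimento):
--             return "CHEATER"
--     restante = sorted(dieta_set - consumido_set)
--     return "".join(restante)
-- ===== SOURCE B (Python) =====
-- def verificar_dieta(dieta, cafe_manha, almoco):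
--     consumido = cafe_manha + almoco
--     sc = sorted(consumido)
--     sd = sorted(dieta)
--     i = 0
--     for x in sc:
--         while i < len(sd) and sd[i] < x:
--             i += 1
--         if i == len(sd) or sd[i] != x:
--             return "CHEATER"
--         i += 1
--     return "".join(sorted(set(dieta) - set(consumido)))
-- ===== Notes on version B (the rewrite author's own statement) =====
-- stated objective: alternative
-- what changed: Replaces A's set-subset test plus a per-item repeated list.count scan with a sort-then-merge pass: sort copies of the consumed and diet lists and verify sub-multiset containment with a two-pointer merge, answering CHEATER at the first unmatched consumed item.
import Mathlib
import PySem

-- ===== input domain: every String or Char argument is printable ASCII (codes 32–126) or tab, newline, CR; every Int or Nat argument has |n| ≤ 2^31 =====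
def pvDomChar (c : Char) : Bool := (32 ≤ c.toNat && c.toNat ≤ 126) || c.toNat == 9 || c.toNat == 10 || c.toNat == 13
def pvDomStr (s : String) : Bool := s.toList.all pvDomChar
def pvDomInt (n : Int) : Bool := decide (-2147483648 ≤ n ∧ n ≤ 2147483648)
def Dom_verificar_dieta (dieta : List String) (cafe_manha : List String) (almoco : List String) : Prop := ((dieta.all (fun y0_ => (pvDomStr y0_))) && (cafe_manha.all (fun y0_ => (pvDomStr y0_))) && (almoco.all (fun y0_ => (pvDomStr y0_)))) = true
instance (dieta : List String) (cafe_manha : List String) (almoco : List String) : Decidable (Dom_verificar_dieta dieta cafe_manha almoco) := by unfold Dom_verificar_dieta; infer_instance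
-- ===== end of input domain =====

-- B replaces A's subset test plus repeated-.count validation with sort-then-merge: sorted copies of the
-- consumed and diet lists are compared by a two-pointer merge checking sub-multiset containment.

-- ===== PORT A =====
-- A's for-loop over consumido: first item over-consumed → CHEATER (true)
def pvACheck (dieta consumido : List String) : List String → Bool
  | [] => false
  | a :: rest =>
    if PySem.List.count consumido a > PySem.List.count dieta a then true
    else pvACheck dieta consumido rest

def verificar_dieta (dieta : List String) (cafe_manha : List String) (almoco : List String) : String :=
  let consumido := cafe_manha ++ almoco
  let dieta_set : PySem.Set String := PySem.Set.ofList dieta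
  let consumido_set : PySem.Set String := PySem.Set.ofList consumido
  if !(PySem.Set.issubset consumido_set dieta_set) then "CHEATER"
  else if pvACheck dieta consumido consumido then "CHEATER"
  else PySem.Str.join "" (PySem.List.sorted (PySem.Set.diff dieta_set consumido_set) (fun x => x) false)

-- ===== PORT B =====
-- B's loop over the sorted consumed list with the diet pointer i: advance the diet side while it is
-- below the consumed item (the inner while), then demand a match (else CHEATER = true) and advance both.
def pvMerge : List String → List String → Bool
  | [], _ => false
  | _ :: _, [] => true
  | c :: cs, d :: ds =>
    if d < c then pvMerge (c :: cs) ds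
    else if d ≠ c then true
    else pvMerge cs ds

def verificar_dieta_alt (dieta : List String) (cafe_manha : List String) (almoco : List String) : String :=
  let consumido := cafe_manha ++ almoco
  let sc := PySem.List.sorted consumido (fun x => x) false
  let sd := PySem.List.sorted dieta (fun x => x) false
  if pvMerge sc sd then "CHEATER"
  else PySem.Str.join "" (PySem.List.sorted (PySem.Set.diff (PySem.Set.ofList dieta) (PySem.Set.ofList consumido)) (fun x => x) false)

-- ===== PRECONDITION & SPEC =====
def Spec_verificar_dieta (dieta : List String) (cafe_manha : List String) (almoco : List String) (out : String) : Prop := out = verificar_dieta_alt dieta cafe_manha almoco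
instance (dieta : List String) (cafe_manha : List String) (almoco : List String) (out : String) : Decidable (Spec_verificar_dieta dieta cafe_manha almoco out) := by unfold Spec_verificar_dieta; infer_instance

-- ===== CLAIM (what is proved, stated in full; the proofs are below) =====
def Claim_equal_verificar_dieta : Prop := ∀ (dieta : List String) (cafe_manha : List String) (almoco : List String), Dom_verificar_dieta dieta cafe_manha almoco → Spec_verificar_dieta dieta cafe_manha almoco (verificar_dieta dieta cafe_manha almoco)

-- ===== LEMMAS AND PROOFS =====

-- A's loop finds an over-consumed item iff one exists in the scanned suffix
theorem pvACheck_iff (dieta consumido : List String) (l : List String) :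
    pvACheck dieta consumido l = true ↔ ∃ x ∈ l, dieta.count x < consumido.count x := by
  induction l with
  | nil => simp [pvACheck]
  | cons a rest ih =>
    simp only [pvACheck, PySem.List.count_eq]
    by_cases h : dieta.count a < consumido.count a
    · simp [h]
    · simp [h, ih]

-- count over a cons, as an if (BEq String unfolded to propositional equality)
theorem count_cons_ite (x y : String) (l : List String) :
    List.count x (y :: l) = List.count x l + (if x = y then 1 else 0) := by
  by_cases h : x = y
  · subst h; simp [List.count_cons_self]
  · simp [List.count_cons_of_ne (fun e => h e.symm), h]

-- B's merge over two ≤-sorted lists reports CHEATER (true) iff the consumed multiset does not fit in the diet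
theorem pvMerge_iff (ds : List String) (cs : List String)
    (hcs : cs.Pairwise (· ≤ ·)) (hds : ds.Pairwise (· ≤ ·)) :
    pvMerge cs ds = true ↔ ∃ x, ds.count x < cs.count x := by
  induction ds generalizing cs with
  | nil =>
    cases cs with
    | nil => simp [pvMerge]
    | cons c cs' =>
      simp only [pvMerge, List.count_nil, true_iff]
      exact ⟨c, by simp [List.count_cons_self]⟩
  | cons d ds' ih =>
    cases cs with
    | nil => simp [pvMerge]
    | cons c cs' =>
      rw [List.pairwise_cons] at hds
      obtain ⟨hdmin, hds'⟩ := hds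
      by_cases hdc : d < c
      · -- advance the diet pointer: d cannot occur in c :: cs'
        have hcmin : ∀ y ∈ cs', c ≤ y := (List.pairwise_cons.mp hcs).1
        have hnot : d ∉ c :: cs' := by
          intro hmem
          rcases List.mem_cons.mp hmem with h | h
          · exact absurd h (ne_of_lt hdc)
          · exact absurd rfl (lt_of_lt_of_le hdc (hcmin d h)).ne
        have hcnt : List.count d (c :: cs') = 0 := List.count_eq_zero.mpr hnot
        simp only [pvMerge]
        rw [if_pos hdc, ih (c :: cs') hcs hds']
        constructor
        · rintro ⟨x, hx⟩
          by_cases hxd : x = d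
          · subst hxd; rw [hcnt] at hx; omega
          · refine ⟨x, ?_⟩
            rwa [count_cons_ite, if_neg hxd, Nat.add_zero]
        · rintro ⟨x, hx⟩
          by_cases hxd : x = d
          · subst hxd
            rw [hcnt, count_cons_ite, if_pos rfl] at hx; omega
          · rw [count_cons_ite, if_neg hxd, Nat.add_zero] at hx
            exact ⟨x, hx⟩
      · by_cases heq : d = c
        · subst heq
          simp only [pvMerge]
          rw [if_neg hdc, if_neg (fun h => h rfl), ih cs' (List.Pairwise.of_cons hcs) hds']
          constructor
          · rintro ⟨x, hx⟩
            refine ⟨x, ?_⟩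
            rw [count_cons_ite, count_cons_ite]
            split_ifs <;> omega
          · rintro ⟨x, hx⟩
            refine ⟨x, ?_⟩
            rw [count_cons_ite, count_cons_ite] at hx
            split_ifs at hx <;> omega
        · -- c < d: c cannot occur in d :: ds', so the consumed item c is unmatchable
          have hcd : c < d := lt_of_le_of_ne (le_of_not_gt hdc) (fun h => heq h.symm)
          have hnot : c ∉ d :: ds' := by
            intro hmem
            rcases List.mem_cons.mp hmem with h | h
            · exact absurd h (ne_of_lt hcd)
            · exact absurd rfl (lt_of_lt_of_le hcd (hdmin c h)).ne
          simp only [pvMerge]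
          rw [if_neg hdc, if_pos (Ne.symm (ne_of_lt hcd))]
          simp only [true_iff]
          exact ⟨c, by
            rw [List.count_eq_zero.mpr hnot, List.count_cons_self]
            omega⟩

theorem verificar_dieta_spec : Claim_equal_verificar_dieta := by
  intro dieta cafe_manha almoco _
  unfold Spec_verificar_dieta verificar_dieta verificar_dieta_alt
  simp only []
  set consumido := cafe_manha ++ almoco with hc
  set sc := PySem.List.sorted consumido (fun x => x) false with hsc
  set sd := PySem.List.sorted dieta (fun x => x) false with hsd
  have hpc : sc.Perm consumido := PySem.List.sorted_perm consumido (fun x => x) false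
  have hpd : sd.Perm dieta := PySem.List.sorted_perm dieta (fun x => x) false
  have hBiff : pvMerge sc sd = true ↔ ∃ x ∈ consumido, dieta.count x < consumido.count x := by
    rw [pvMerge_iff sd sc (PySem.List.sorted_pairwise consumido (fun x => x))
          (PySem.List.sorted_pairwise dieta (fun x => x))]
    constructor
    · rintro ⟨x, hx⟩
      rw [hpc.count_eq, hpd.count_eq] at hx
      refine ⟨x, List.count_pos_iff.mp (by omega), hx⟩
    · rintro ⟨x, _, hx⟩
      exact ⟨x, by rw [hpc.count_eq, hpd.count_eq]; exact hx⟩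
  by_cases hE : ∃ x ∈ consumido, dieta.count x < consumido.count x
  · -- both sides return CHEATER
    rw [if_pos (hBiff.mpr hE)]
    by_cases hsub : PySem.Set.issubset (PySem.Set.ofList consumido) (PySem.Set.ofList dieta) = true
    · rw [hsub]
      simp only [Bool.not_true, Bool.false_eq_true, if_false]
      rw [if_pos ((pvACheck_iff dieta consumido consumido).mpr hE)]
    · simp [hsub]
  · -- no cheating: both compute the remaining foods
    rw [if_neg (fun h => hE (hBiff.mp h))]
    have hsub : PySem.Set.issubset (PySem.Set.ofList consumido) (PySem.Set.ofList dieta) = true := by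
      rw [PySem.Set.issubset_iff]
      intro x hx
      rw [PySem.Set.mem_ofList] at hx ⊢
      by_contra hnd
      exact hE ⟨x, hx, by
        have h1 : dieta.count x = 0 := List.count_eq_zero.mpr hnd
        have h2 : 0 < consumido.count x := List.count_pos_iff.mpr hx
        omega⟩
    rw [hsub]
    simp only [Bool.not_true, Bool.false_eq_true, if_false]
    rw [if_neg (by rw [pvACheck_iff]; exact hE)]
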